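-- pv_equiv track=rewrite | github.com/TommasoMolesti/faas-scheduler-testbed | custom_python_heavy/loop_function.py | fibonacci_nums
-- ===== SOURCE A (Python) =====
-- def fibonacci_nums(n):
--     if n <= 0:
--         sequence = "0"
--         return sequence
--     sequence = "0, 1"
--     count = 2
--     n1 = 0
--     n2 = 1
--     while count <= n:
--         next_value = n2 + n1
--         sequence += "," + str(next_value)
--         n1 = n2
--         n2 = next_value
--         count += 1
--     return sequence
-- ===== SOURCE B (Python) =====
-- def _fib_pair(k):
--     # fast doubling: returns (F(k), F(k+1))
--     if k == 0:
--         return (0, 1)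
--     a, b = _fib_pair(k // 2)
--     c = a * (2 * b - a)
--     d = a * a + b * b
--     if k % 2 == 1:
--         return (d, c + d)
--     return (c, d)
--
-- def fibonacci_nums(n):
--     if n <= 0:
--         return "0"
--     return "0, 1" + "".join("," + str(_fib_pair(i)[0]) for i in range(2, n + 1))
-- ===== Notes on version B (the rewrite author's own statement) =====
-- stated objective: alternative
-- what changed: B computes each Fibonacci number independently by recursive fast doubling (F(2k), F(2k+1) identities) and formats them in a separate join pass, instead of A's single loop carrying the previous two values and accumulating the string incrementally.
import Mathlib
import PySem

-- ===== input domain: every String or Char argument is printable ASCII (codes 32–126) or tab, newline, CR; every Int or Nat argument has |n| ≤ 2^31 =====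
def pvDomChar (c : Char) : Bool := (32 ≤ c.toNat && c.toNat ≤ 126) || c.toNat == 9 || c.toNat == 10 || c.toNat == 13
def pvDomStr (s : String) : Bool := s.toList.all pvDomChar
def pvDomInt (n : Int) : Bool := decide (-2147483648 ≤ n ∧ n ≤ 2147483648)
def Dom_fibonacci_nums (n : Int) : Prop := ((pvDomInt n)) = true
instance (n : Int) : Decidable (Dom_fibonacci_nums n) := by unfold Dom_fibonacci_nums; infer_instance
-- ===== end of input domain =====

-- B computes each Fibonacci number independently by recursive fast doubling and joins them
-- in a separate formatting pass, instead of A's loop carrying the previous two values while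
-- accumulating the string; an alternative decomposition, not claimed faster.

-- ===== PORT A =====
-- the while loop: state (count, n1, n2, sequence); string carried as List Char (PySem convention)
def fibLoopA (n count n1 n2 : Int) (seq : List Char) : List Char :=
  if count ≤ n then
    let next := n2 + n1
    fibLoopA n (count + 1) n2 next (seq ++ (',' :: PySem.Int.toChars next))
  else seq
termination_by (n + 1 - count).toNat
decreasing_by omega

def fibonacci_nums (n : Int) : String :=
  if n ≤ 0 then "0"
  else String.ofList (fibLoopA n 2 0 1 ['0', ',', ' ', '1'])

-- ===== PORT B =====
-- _fib_pair of Source B: fast doubling, (F(k), F(k+1)); indices are the nonnegative ints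
-- range(2, n+1) produces, so the helper is Nat-indexed (k // 2 = k / 2 on Nat).
def fibPairB (k : Nat) : Int × Int :=
  if k = 0 then (0, 1)
  else
    let p := fibPairB (k / 2)
    let a := p.1
    let b := p.2
    let c := a * (2 * b - a)
    let d := a * a + b * b
    if k % 2 = 1 then (d, c + d) else (c, d)
termination_by k
decreasing_by exact Nat.div_lt_self (by omega) (by omega)

def fibonacci_nums_alt (n : Int) : String :=
  if n ≤ 0 then "0"
  else String.ofList (['0', ',', ' ', '1'] ++
    PySem.Chars.join []
      ((PySem.List.pyRange 2 (n + 1) 1).map (fun i => ',' :: PySem.Int.toChars (fibPairB i.toNat).1)))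

-- ===== PRECONDITION & SPEC =====
def Spec_fibonacci_nums (n : Int) (out : String) : Prop := out = fibonacci_nums_alt n
instance (n : Int) (out : String) : Decidable (Spec_fibonacci_nums n out) := by unfold Spec_fibonacci_nums; infer_instance

-- ===== CLAIM (what is proved, stated in full; the proofs are below) =====
def Claim_equal_fibonacci_nums : Prop := ∀ (n : Int), Dom_fibonacci_nums n → Spec_fibonacci_nums n (fibonacci_nums n)

-- ===== LEMMAS AND PROOFS =====

-- fast doubling is the Fibonacci sequence
lemma fibPairB_eq : ∀ k : Nat, fibPairB k = ((Nat.fib k : Int), (Nat.fib (k + 1) : Int)) := by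
  intro k
  induction k using Nat.strong_induction_on with
  | _ k ih =>
    rw [fibPairB]
    by_cases h0 : k = 0
    · simp [h0]
    · rw [if_neg h0, ih (k / 2) (Nat.div_lt_self (by omega) (by omega))]
      have hle : Nat.fib (k / 2) ≤ 2 * Nat.fib (k / 2 + 1) :=
        le_trans Nat.fib_le_fib_succ (by omega)
      have e1 : (Nat.fib (2 * (k / 2) + 1) : Int) =
          (Nat.fib (k / 2 + 1) : Int) ^ 2 + (Nat.fib (k / 2) : Int) ^ 2 := by
        rw [Nat.fib_two_mul_add_one]; push_cast; ring
      have e0 : (Nat.fib (2 * (k / 2)) : Int) =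
          (Nat.fib (k / 2) : Int) * (2 * (Nat.fib (k / 2 + 1) : Int) - Nat.fib (k / 2)) := by
        rw [Nat.fib_two_mul, Nat.cast_mul, Nat.cast_sub hle]; push_cast; ring
      by_cases hpar : k % 2 = 1
      · rw [if_pos hpar]
        set m := k / 2 with hm
        have hk : k = 2 * m + 1 := by omega
        rw [hk]
        have e2 : (Nat.fib (2 * m + 1 + 1) : Int) =
            (Nat.fib (2 * m) : Int) + (Nat.fib (2 * m + 1) : Int) := by
          have h : 2 * m + 1 + 1 = 2 * m + 2 := by omega
          rw [h, Nat.fib_add_two]; push_cast; ring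
        simp only [Prod.mk.injEq]
        refine ⟨by rw [e1]; ring, by rw [e2, e0, e1]; ring⟩
      · rw [if_neg hpar]
        set m := k / 2 with hm
        have hk : k = 2 * m := by omega
        rw [hk]
        simp only [Prod.mk.injEq]
        refine ⟨by rw [e0], by rw [e1]; ring⟩

-- A's loop appends exactly the Fibonacci numbers F(count), …, F(n) (as comma-prefixed digits)
lemma fibLoopA_eq (n : Int) : ∀ (k : Nat) (count : Int) (m : Nat) (seq : List Char),
    (n + 1 - count).toNat = k →
    fibLoopA n count (Nat.fib m) (Nat.fib (m + 1)) seq =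
      seq ++ (List.range k).flatMap (fun j => ',' :: PySem.Int.toChars (Nat.fib (m + 2 + j))) := by
  intro k
  induction k with
  | zero =>
    intro count m seq hk
    rw [fibLoopA, if_neg (by omega)]
    simp
  | succ k ih =>
    intro count m seq hk
    rw [fibLoopA, if_pos (by omega)]
    show fibLoopA n (count + 1) (Nat.fib (m + 1)) ((Nat.fib (m + 1) : Int) + Nat.fib m) _ = _
    have hfib : ((Nat.fib (m + 1) : Int) + Nat.fib m) = (Nat.fib (m + 1 + 1) : Int) := by
      rw [Nat.fib_add_two]; push_cast; ring
    rw [hfib, ih (count + 1) (m + 1) _ (by omega)]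
    rw [List.range_succ_eq_map]
    simp only [List.flatMap_cons, List.flatMap_map, List.append_assoc, Nat.succ_eq_add_one]
    have e1' : m + 2 + 0 = m + 1 + 1 := by omega
    have e2' : ∀ j : Nat, m + 2 + (j + 1) = m + 1 + 2 + j := fun j => by omega
    simp only [e1', e2']

lemma join_nil_flatten (xs : List (List Char)) : PySem.Chars.join [] xs = xs.flatten := by
  induction xs with
  | nil => simp [pysem]
  | cons x rest ih =>
    cases rest with
    | nil => simp [pysem]
    | cons y r => rw [PySem.Chars.join_cons_cons]; simp_all

-- ===== VERDICT (by name: the statement is the Claim_ definition above) =====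
theorem fibonacci_nums_spec : Claim_equal_fibonacci_nums := by
  intro n _
  unfold Spec_fibonacci_nums fibonacci_nums fibonacci_nums_alt
  by_cases h : n ≤ 0
  · simp [h]
  · rw [if_neg h, if_neg h]
    have hA := fibLoopA_eq n (n - 1).toNat 2 0 ['0', ',', ' ', '1'] (by omega)
    norm_num at hA
    rw [hA, PySem.List.pyRange_one, join_nil_flatten, List.map_map, ← List.flatMap_def]
    have hrange : (n + 1 - 2).toNat = n.toNat - 1 := by omega
    rw [hrange]
    have hfun : ∀ j : Nat, (fibPairB ((2 : Int) + (j : Int)).toNat).1 = ((Nat.fib (2 + j) : Int)) := by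
      intro j
      have ht : ((2 : Int) + (j : Int)).toNat = 2 + j := by omega
      rw [ht, fibPairB_eq]
    have hff : (fun j : Nat => ',' :: PySem.Int.toChars ((Nat.fib (2 + j) : Int))) =
        ((fun i : Int => ',' :: PySem.Int.toChars (fibPairB i.toNat).1) ∘ fun k : Nat => 2 + (k : Int)) := by
      funext j
      simp only [Function.comp_apply]
      rw [hfun]
    rw [hff]
    rfl
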